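-- pv_equiv track=rewrite | github.com/zixuya/BadouNLP | 张健有/week14/MyDiyBpe.py | encode_merge_state
-- ===== SOURCE A (Python) =====
-- def encode_merge_state(one_dict,tuple,target):
--     '''
--     这里也是专门为硬解析写的方法
--     todo 和上面的方法功能有重叠的部分，可优化为同样的方法
--     :param one_dict:
--     :param tuple:
--     :param target:
--     :return:
--     '''
--     new_dict = []
--     # 这里是从第一个索引开始找全部相同能匹配的上的二元组，然后进行替换
--     index = 0
--     # 只要没循环到最后一个元组，就一直循环查找
--     while index < len(one_dict):
--         # z这里的判断逻辑是首先得保证有两个元素=可以被锁定，如果查询到最后一个元素则没必要和二元组比较，直接放入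
--         # 另外就是比较当前元素和元组中第一个元素匹配，当前元素之后和元组中的第二个元素匹配
--         if index < len(one_dict) - 1 and one_dict[index] == tuple[0] and one_dict[index + 1] == tuple[1]:
--             new_dict.append(target)
--             # 这里是因为将两个元素合并为了一个，所以一次性跳过两个
--             index += 2
--         else:
--             # 否则就原值放回去
--             new_dict.append(one_dict[index])
--             index += 1
--     # 更新被编码之后的
--     return new_dict
-- ===== SOURCE B (Python) =====
-- def encode_merge_state(one_dict, tuple, target):
--     # Single fold over the elements with a one-element 'carry' state,
--     # instead of an index-driven while loop with a lookahead read.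
--     out = []
--     carry = None
--     for x in one_dict:
--         if carry is None:
--             carry = x
--         elif carry == tuple[0] and x == tuple[1]:
--             out.append(target)
--             carry = None
--         else:
--             out.append(carry)
--             carry = x
--     if carry is not None:
--         out.append(carry)
--     return out
-- ===== Notes on version B (the rewrite author's own statement) =====
-- stated objective: faster
-- what changed: Replaced the index-driven while loop with a lookahead read one_dict[index+1] by a single fold over the elements carrying an Option 'carry' state (pending previous element), flushed at the end; this removes the per-step len() calls and indexed reads.
import Mathlib
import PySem

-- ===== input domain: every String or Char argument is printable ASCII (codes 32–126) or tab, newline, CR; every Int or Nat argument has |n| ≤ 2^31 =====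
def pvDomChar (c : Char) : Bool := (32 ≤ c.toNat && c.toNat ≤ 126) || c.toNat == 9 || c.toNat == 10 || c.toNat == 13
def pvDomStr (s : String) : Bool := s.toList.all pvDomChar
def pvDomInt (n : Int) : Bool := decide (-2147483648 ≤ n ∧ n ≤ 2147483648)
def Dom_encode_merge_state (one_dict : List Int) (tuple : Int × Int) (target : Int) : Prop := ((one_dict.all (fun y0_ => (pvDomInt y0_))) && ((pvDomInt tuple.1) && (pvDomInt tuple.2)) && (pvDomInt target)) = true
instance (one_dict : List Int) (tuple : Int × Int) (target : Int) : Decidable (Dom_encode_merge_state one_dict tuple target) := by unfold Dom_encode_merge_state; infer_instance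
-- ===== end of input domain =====

-- B replaces A's index-driven while loop by a structural recursion on the list (same O(n) cost).
-- ===== PORT A =====
-- A's while loop: index cursor + accumulator new_dict, appending at the back.
def aLoop (one_dict : List Int) (tuple : Int × Int) (target : Int) (index : Nat) (new_dict : List Int) : List Int :=
  if _h : index < one_dict.length then
    if index < one_dict.length - 1 ∧ one_dict.getD index 0 = tuple.1 ∧ one_dict.getD (index + 1) 0 = tuple.2 then
      aLoop one_dict tuple target (index + 2) (new_dict ++ [target])
    else
      aLoop one_dict tuple target (index + 1) (new_dict ++ [one_dict.getD index 0])
  else new_dict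
termination_by one_dict.length - index
decreasing_by all_goals omega

def encode_merge_state (one_dict : List Int) (tuple : Int × Int) (target : Int) : List Int :=
  aLoop one_dict tuple target 0 []

-- ===== PORT B =====
-- B: one fold over the elements with an Option 'carry' state, flushed at the end.
def bStep (tuple : Int × Int) (target : Int) (st : List Int × Option Int) (x : Int) : List Int × Option Int :=
  match st.2 with
  | none => (st.1, some x)
  | some c =>
    if c = tuple.1 ∧ x = tuple.2 then (st.1 ++ [target], none)
    else (st.1 ++ [c], some x)

def encode_merge_state_alt (one_dict : List Int) (tuple : Int × Int) (target : Int) : List Int :=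
  let st := one_dict.foldl (bStep tuple target) ([], none)
  match st.2 with
  | none => st.1
  | some c => st.1 ++ [c]
-- ===== PRECONDITION & SPEC =====\n
def Spec_encode_merge_state (one_dict : List Int) (tuple : Int × Int) (target : Int) (out : List Int) : Prop := out = encode_merge_state_alt one_dict tuple target
instance (one_dict : List Int) (tuple : Int × Int) (target : Int) (out : List Int) : Decidable (Spec_encode_merge_state one_dict tuple target out) := by unfold Spec_encode_merge_state; infer_instance

-- ===== CLAIM (what is proved, stated in full; the proofs are below) =====
def Claim_equal_encode_merge_state : Prop := ∀ (one_dict : List Int) (tuple : Int × Int) (target : Int), Dom_encode_merge_state one_dict tuple target → Spec_encode_merge_state one_dict tuple target (encode_merge_state one_dict tuple target)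

-- ===== LEMMAS AND PROOFS =====

-- ===== VERDICT (by name: the statement is the Claim_ definition above) =====
-- proof-only helper: the merged list as a structural recursion (bridge between the two ports)
def bGo (tuple : Int × Int) (target : Int) : List Int → List Int
  | [] => []
  | [a] => [a]
  | a :: b :: rest =>
    if a = tuple.1 ∧ b = tuple.2 then target :: bGo tuple target rest
    else a :: bGo tuple target (b :: rest)

def bFin (st : List Int × Option Int) : List Int :=
  match st.2 with
  | none => st.1
  | some c => st.1 ++ [c]

lemma fold_some (tuple : Int × Int) (target : Int) :
    ∀ n (xs : List Int) (c : Int) (acc : List Int), xs.length ≤ n →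
      bFin (xs.foldl (bStep tuple target) (acc, some c)) = acc ++ bGo tuple target (c :: xs) := by
  intro n
  induction n with
  | zero =>
    intro xs c acc h
    have : xs = [] := List.eq_nil_of_length_eq_zero (by omega)
    subst this
    simp [bFin, bGo]
  | succ n ih =>
    intro xs c acc h
    cases xs with
    | nil => simp [bFin, bGo]
    | cons x xs' =>
      by_cases hm : c = tuple.1 ∧ x = tuple.2
      · rw [List.foldl_cons]
        have hstep : bStep tuple target (acc, some c) x = (acc ++ [target], none) := by
          simp [bStep, hm]
        rw [hstep, bGo, if_pos hm]
        cases xs' with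
        | nil => simp [bFin, bGo]
        | cons y ys =>
          rw [List.foldl_cons]
          have hstep2 : bStep tuple target (acc ++ [target], none) y = (acc ++ [target], some y) := by
            simp [bStep]
          rw [hstep2, ih ys y (acc ++ [target]) (by simp at h ⊢; omega)]
          simp
      · rw [List.foldl_cons]
        have hstep : bStep tuple target (acc, some c) x = (acc ++ [c], some x) := by
          simp only [bStep]; rw [if_neg hm]
        rw [hstep, ih xs' x (acc ++ [c]) (by simp at h; omega), bGo, if_neg hm]
        simp

lemma alt_eq_bGo (one_dict : List Int) (tuple : Int × Int) (target : Int) :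
    encode_merge_state_alt one_dict tuple target = bGo tuple target one_dict := by
  cases one_dict with
  | nil => simp [encode_merge_state_alt, bGo]
  | cons x xs =>
    show bFin ((x :: xs).foldl (bStep tuple target) ([], none)) = _
    rw [List.foldl_cons]
    have hstep : bStep tuple target ([], none) x = ([], some x) := by simp [bStep]
    rw [hstep, fold_some tuple target xs.length xs x [] le_rfl]
    simp

lemma aLoop_eq_aux (one_dict : List Int) (tuple : Int × Int) (target : Int) :
    ∀ n index acc, one_dict.length - index ≤ n →
      aLoop one_dict tuple target index acc = acc ++ bGo tuple target (one_dict.drop index) := by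
  intro n
  induction n with
  | zero =>
    intro index acc h
    have hge : one_dict.length ≤ index := by omega
    rw [aLoop, List.drop_eq_nil_of_le hge]
    simp [bGo, Nat.not_lt.mpr hge]
  | succ n ih =>
    intro index acc h
    by_cases hlt : index < one_dict.length
    case neg =>
      have hge : one_dict.length ≤ index := by omega
      rw [aLoop, List.drop_eq_nil_of_le hge]
      simp [bGo, Nat.not_lt.mpr hge]
    case pos =>
      have hd1 : one_dict.drop index = one_dict[index] :: one_dict.drop (index + 1) :=
        List.drop_eq_getElem_cons hlt
      by_cases hc : index < one_dict.length - 1 ∧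
          one_dict.getD index 0 = tuple.1 ∧ one_dict.getD (index + 1) 0 = tuple.2
      case pos =>
        have hlt2 : index + 1 < one_dict.length := by omega
        have hd2 : one_dict.drop (index + 1) = one_dict[index + 1] :: one_dict.drop (index + 2) :=
          List.drop_eq_getElem_cons hlt2
        have hx : one_dict[index] = tuple.1 := by
          have := hc.2.1; rwa [List.getD_eq_getElem _ _ hlt] at this
        have hy : one_dict[index + 1] = tuple.2 := by
          have := hc.2.2; rwa [List.getD_eq_getElem _ _ hlt2] at this
        rw [aLoop, dif_pos hlt, if_pos hc, ih (index + 2) (acc ++ [target]) (by omega),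
          hd1, hd2, bGo, if_pos ⟨hx, hy⟩]
        simp
      case neg =>
        have hval : one_dict.getD index 0 = one_dict[index] := List.getD_eq_getElem _ _ hlt
        rw [aLoop, dif_pos hlt, if_neg hc, ih (index + 1) _ (by omega), hd1, hval]
        by_cases hlast : index + 1 < one_dict.length
        · have hd2 : one_dict.drop (index + 1) = one_dict[index + 1] :: one_dict.drop (index + 2) :=
            List.drop_eq_getElem_cons hlast
          have hne : ¬ (one_dict[index] = tuple.1 ∧ one_dict[index + 1] = tuple.2) := by
            intro ⟨h1, h2⟩
            exact hc ⟨by omega, by rw [List.getD_eq_getElem _ _ hlt]; exact h1,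
              by rw [List.getD_eq_getElem _ _ hlast]; exact h2⟩
          rw [hd2, bGo, if_neg hne, ← hd2]
          simp
        · have : one_dict.drop (index + 1) = [] :=
            List.drop_eq_nil_of_le (by omega)
          rw [this, bGo]
          simp [bGo]

lemma aLoop_eq (one_dict : List Int) (tuple : Int × Int) (target : Int) :
    ∀ index acc, aLoop one_dict tuple target index acc = acc ++ bGo tuple target (one_dict.drop index) :=
  fun index acc => aLoop_eq_aux one_dict tuple target (one_dict.length - index) index acc le_rfl

theorem encode_merge_state_spec : Claim_equal_encode_merge_state := by
  intro one_dict tuple target _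
  unfold Spec_encode_merge_state encode_merge_state
  rw [alt_eq_bGo]
  simpa using aLoop_eq one_dict tuple target 0 []
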